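-- pv_equiv track=rewrite | github.com/ApexAI/performance_test | performance_test/helper_scripts/regression_checkers/ApexComparison.py | _calc_jitter
-- ===== SOURCE A (Python) =====
-- def _calc_jitter(latencies):
--     """
--     Calculate the jitter of a set of latencies.
--
--     :param latencies (list): The set of latencies
--
--     :return: A list containing the jitters
--     """
--     jitter = []
--     prev_i = 0
--     first = True
--     for i in latencies:
--         if first:
--             first = False
--         else:
--             jitter.append(abs(i - prev_i))
--         prev_i = i
--     return jitter
-- ===== SOURCE B (Python) =====
-- def _calc_jitter(latencies):
--     """
--     Jitter via an explicit stack: repeatedly pop the last latency, compare it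
--     with the new top of the stack, and build the jitter list back-to-front.
--     """
--     stack = list(latencies)
--     out = []
--     while len(stack) >= 2:
--         x = stack.pop()
--         out.append(abs(x - stack[-1]))
--     out.reverse()
--     return out
-- ===== Notes on version B (the rewrite author's own statement) =====
-- stated objective: alternative
-- what changed: Replaces A's forward one-pass loop carrying prev_i and a first flag with a stack-consuming loop that pops latencies from the end and builds the jitter list back-to-front, reversing it at the end.
import Mathlib
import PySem

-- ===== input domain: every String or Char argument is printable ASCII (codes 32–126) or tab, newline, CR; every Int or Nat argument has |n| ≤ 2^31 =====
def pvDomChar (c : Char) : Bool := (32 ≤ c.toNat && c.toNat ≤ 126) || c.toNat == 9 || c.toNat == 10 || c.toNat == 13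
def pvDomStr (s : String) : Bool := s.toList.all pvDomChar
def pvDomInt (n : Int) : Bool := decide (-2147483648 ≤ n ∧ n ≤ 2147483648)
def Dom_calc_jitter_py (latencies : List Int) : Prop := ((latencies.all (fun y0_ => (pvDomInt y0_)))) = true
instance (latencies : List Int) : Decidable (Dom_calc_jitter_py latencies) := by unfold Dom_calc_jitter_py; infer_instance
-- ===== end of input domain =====

-- B replaces A's forward prev_i/first loop with a stack consumed from the end,
-- building the jitter list back-to-front and reversing it (alternative; same cost).

-- ===== PORT A =====
-- literal transliteration: loop state is (jitter, prev_i, first)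
def calc_jitter_py (latencies : List Int) : List Int :=
  (latencies.foldl
    (fun (s : List Int × Int × Bool) i =>
      if s.2.2 then (s.1, i, false)
      else (s.1 ++ [|i - s.2.1|], i, false))
    ([], 0, true)).1

-- ===== PORT B =====
-- the while loop of Source B: stack.pop() = PySem.List.pop? stack (-1); stack[-1] = pyGet? (-1)
-- (.getD 0 is unreachable: the stack has ≥ 2 elements when popped, ≥ 1 after)
def calcJitterLoop (stack : List Int) (out : List Int) : List Int :=
  if 2 ≤ stack.length then
    match h : PySem.List.pop? stack (-1) with
    | some (x, rest) =>
        have : rest.length < stack.length := by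
          have h1 := PySem.List.length_of_pop?_eq_some stack h
          simp only [] at h1; omega
        calcJitterLoop rest (out ++ [|x - (PySem.List.pyGet? rest (-1)).getD 0|])
    | none => out
  else out
termination_by stack.length

def calc_jitter_py_alt (latencies : List Int) : List Int :=
  (calcJitterLoop latencies []).reverse

-- ===== PRECONDITION & SPEC =====
def Spec_calc_jitter_py (latencies : List Int) (out : List Int) : Prop := out = calc_jitter_py_alt latencies
instance (latencies : List Int) (out : List Int) : Decidable (Spec_calc_jitter_py latencies out) := by unfold Spec_calc_jitter_py; infer_instance

-- ===== CLAIM (what is proved, stated in full; the proofs are below) =====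
def Claim_equal_calc_jitter_py : Prop := ∀ (latencies : List Int), Dom_calc_jitter_py latencies → Spec_calc_jitter_py latencies (calc_jitter_py latencies)

-- ===== LEMMAS AND PROOFS =====

-- the common characterisation: absolute differences of adjacent pairs
def pwJitter (l : List Int) : List Int :=
  (l.zip l.tail).map (fun p => |p.2 - p.1|)

theorem pwJitter_cons_cons (a b : Int) (t : List Int) :
    pwJitter (a :: b :: t) = |b - a| :: pwJitter (b :: t) := by
  simp [pwJitter]

theorem pwJitter_append_last (ys : List Int) (x : Int) (h : ys ≠ []) :
    pwJitter (ys ++ [x]) = pwJitter ys ++ [|x - ys.getLast h|] := by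
  induction ys with
  | nil => exact absurd rfl h
  | cons a t ih =>
      cases t with
      | nil => simp [pwJitter]
      | cons b t' =>
          have := ih (by simp)
          simp only [List.cons_append, pwJitter_cons_cons] at *
          rw [this]
          simp [List.getLast]

-- After the first element, A's fold from state (acc, prev, false) appends exactly the
-- pairwise absolute differences of prev::l.
theorem calc_jitter_fold_inv (l : List Int) (acc : List Int) (prev : Int) :
    (l.foldl
      (fun (s : List Int × Int × Bool) i =>
        if s.2.2 then (s.1, i, false)
        else (s.1 ++ [|i - s.2.1|], i, false))
      (acc, prev, false)).1
      = acc ++ pwJitter (prev :: l) := by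
  induction l generalizing acc prev with
  | nil => simp [pwJitter]
  | cons h t ih =>
      simp only [List.foldl_cons, if_neg (by simp : ¬ (false = true))]
      rw [ih, pwJitter_cons_cons]
      simp

-- B's stack loop emits pwJitter backwards
theorem calcJitterLoop_eq (stack out : List Int) :
    calcJitterLoop stack out = out ++ (pwJitter stack).reverse := by
  by_cases h2 : 2 ≤ stack.length
  · obtain ⟨ys, x, rfl⟩ : ∃ ys x, stack = ys ++ [x] := by
      rcases List.eq_nil_or_concat stack with h | ⟨ys, x, h⟩
      · simp [h] at h2
      · exact ⟨ys, x, by simpa [List.concat_eq_append] using h⟩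
    have hys : ys ≠ [] := by
      intro e; simp [e] at h2
    rw [calcJitterLoop, if_pos h2]
    rw [show (match h : PySem.List.pop? (ys ++ [x]) (-1) with
      | some (x, rest) => calcJitterLoop rest (out ++ [|x - (PySem.List.pyGet? rest (-1)).getD 0|])
      | none => out) = calcJitterLoop ys (out ++ [|x - (PySem.List.pyGet? ys (-1)).getD 0|]) from by
        rw [PySem.List.pop?_last ys x]]
    rw [calcJitterLoop_eq ys, PySem.List.pyGet?_neg_one,
        List.getLast?_eq_some_getLast hys, pwJitter_append_last ys x hys]
    simp
  · rw [calcJitterLoop, if_neg h2]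
    match stack, h2 with
    | [], _ => simp [pwJitter]
    | [a], _ => simp [pwJitter]
    | a :: b :: t, h2 => exact absurd (by simp) h2
termination_by stack.length
decreasing_by subst_vars; simp

-- ===== VERDICT (by name: the statement is the Claim_ definition above) =====
theorem calc_jitter_py_spec : Claim_equal_calc_jitter_py := by
  intro latencies _
  unfold Spec_calc_jitter_py calc_jitter_py calc_jitter_py_alt
  rw [calcJitterLoop_eq]
  cases latencies with
  | nil => simp [pwJitter]
  | cons h t =>
      simp only [List.foldl_cons, if_true]
      rw [calc_jitter_fold_inv]
      simp
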